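-- pv_equiv track=rewrite | github.com/mfmezger/zukuagent | src/zukuagent/core/agent.py | _compress_skill_content
-- ===== SOURCE A (Python) =====
-- def _compress_skill_content(content: str, skill_name: str) -> str:
--     """Compress verbose skill text into a concise prompt summary."""
--     non_empty = [line.strip() for line in content.splitlines() if line.strip()]
--     if not non_empty:
--         return f"Skill `{skill_name}` with no additional details."
--
--     description = ""
--     for line in non_empty:
--         if line.lower().startswith("description:"):
--             description = line.split(":", 1)[1].strip()
--             break
--
--     body_candidates: list[str] = []
--     for line in non_empty:
--         if line.startswith(("#", "---")):
--             continue
--         if line.lower().startswith(("name:", "description:", "license:")):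
--             continue
--         body_candidates.append(line)
--         if len(body_candidates) == 4:
--             break
--
--     summary_parts = [f"Skill `{skill_name}`."]
--     if description:
--         summary_parts.append(f"Description: {description}")
--     if body_candidates:
--         summary_parts.append("Key guidance: " + " ".join(body_candidates))
--     return " ".join(summary_parts)
-- ===== SOURCE B (Python) =====
-- def _compress_skill_content(content: str, skill_name: str) -> str:
--     """Compress verbose skill text into a concise prompt summary (single pass)."""
--     seen = False
--     desc_found = False
--     description = ""
--     body: list[str] = []
--     for raw in content.splitlines():
--         line = raw.strip()
--         if not line:
--             continue
--         seen = True
--         low = line.lower()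
--         if not desc_found and low.startswith("description:"):
--             desc_found = True
--             description = line.split(":", 1)[1].strip()
--         if (
--             len(body) < 4
--             and not line.startswith(("#", "---"))
--             and not low.startswith(("name:", "description:", "license:"))
--         ):
--             body.append(line)
--     if not seen:
--         return f"Skill `{skill_name}` with no additional details."
--     parts = [f"Skill `{skill_name}`."]
--     if description:
--         parts.append(f"Description: {description}")
--     if body:
--         parts.append("Key guidance: " + " ".join(body))
--     return " ".join(parts)
-- ===== Notes on version B (the rewrite author's own statement) =====
-- stated objective: simpler
-- what changed: Replaces A's list comprehension plus two separate sequential scans (one for the description with break, one for the first four body candidates with break) by a single fold over the raw lines that maintains the description (first match wins), the body-candidate list (capped at 4) and a seen-a-nonempty-line flag together.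
import Mathlib
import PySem

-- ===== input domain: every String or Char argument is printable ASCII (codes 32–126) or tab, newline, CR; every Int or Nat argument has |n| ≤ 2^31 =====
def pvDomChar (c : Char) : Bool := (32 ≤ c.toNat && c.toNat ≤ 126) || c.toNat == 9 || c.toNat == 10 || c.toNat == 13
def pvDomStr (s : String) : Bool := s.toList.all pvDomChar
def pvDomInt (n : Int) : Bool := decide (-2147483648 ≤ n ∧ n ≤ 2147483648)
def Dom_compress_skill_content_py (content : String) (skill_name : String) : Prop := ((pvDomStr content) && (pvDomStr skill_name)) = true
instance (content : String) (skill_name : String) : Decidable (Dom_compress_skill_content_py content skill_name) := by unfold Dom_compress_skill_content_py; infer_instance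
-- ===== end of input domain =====

-- B replaces A's list comprehension plus two sequential scans by a single fold over the raw
-- lines that maintains the description and the body candidates together (objective: simpler).

-- shared helper: line.split(":", 1)[1].strip()  (both Pythons contain this exact expression;
-- .getD totalises the [1] index, which is always present when the line contains ':')
def pvAfterColon (line : String) : String :=
  PySem.Str.strip (((PySem.Str.splitMax? line ":" 1).getD []).getD 1 "")

-- shared helper: the identical summary-assembly tail of both Pythons
def pvAssemble (skill_name : String) (description : String) (body : List String) : String :=
  let parts := ["Skill `" ++ skill_name ++ "`."]
  let parts := if description ≠ "" then parts ++ ["Description: " ++ description] else parts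
  let parts := if body ≠ [] then parts ++ ["Key guidance: " ++ PySem.Str.join " " body] else parts
  PySem.Str.join " " parts

-- A-side helper: A's list comprehension [line.strip() for line in content.splitlines() if line.strip()]
def pvNE (rs : List String) : List String :=
  (rs.map PySem.Str.strip).filter (fun l => l != "")

-- ===== PORT A =====
-- first loop of A: first line whose lowercase starts with "description:" (break), else ""
def pvDescLoop : List String → String
  | [] => ""
  | l :: rest =>
    if PySem.Str.startswith (PySem.Str.lower l) "description:" then pvAfterColon l
    else pvDescLoop rest

-- second loop of A: collect up to 4 body candidates (break at 4)
def pvBodyLoop : List String → List String → List String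
  | [], acc => acc
  | l :: rest, acc =>
    if PySem.Str.startswith l "#" || PySem.Str.startswith l "---" then pvBodyLoop rest acc
    else if PySem.Str.startswith (PySem.Str.lower l) "name:" ||
            PySem.Str.startswith (PySem.Str.lower l) "description:" ||
            PySem.Str.startswith (PySem.Str.lower l) "license:" then pvBodyLoop rest acc
    else
      let acc' := acc ++ [l]
      if acc'.length = 4 then acc' else pvBodyLoop rest acc'

def compress_skill_content_py (content : String) (skill_name : String) : String :=
  let non_empty := pvNE (PySem.Str.splitlines content)
  if non_empty = [] then "Skill `" ++ skill_name ++ "` with no additional details."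
  else pvAssemble skill_name (pvDescLoop non_empty) (pvBodyLoop non_empty [])

-- ===== PORT B =====
-- B's single pass: state (seen, desc_found, description, body)
def pvAltLoop : List String → Bool → Bool → String → List String → Bool × Bool × String × List String
  | [], seen, df, d, body => (seen, df, d, body)
  | raw :: rest, seen, df, d, body =>
    let line := PySem.Str.strip raw
    if line == "" then pvAltLoop rest seen df d body
    else
      let low := PySem.Str.lower line
      let p := if !df && PySem.Str.startswith low "description:" then (true, pvAfterColon line)
               else (df, d)
      let body' :=
        if body.length < 4 &&
           !(PySem.Str.startswith line "#" || PySem.Str.startswith line "---") &&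
           !(PySem.Str.startswith low "name:" || PySem.Str.startswith low "description:" ||
             PySem.Str.startswith low "license:")
        then body ++ [line] else body
      pvAltLoop rest true p.1 p.2 body'

def compress_skill_content_py_alt (content : String) (skill_name : String) : String :=
  let st := pvAltLoop (PySem.Str.splitlines content) false false "" []
  if !st.1 then "Skill `" ++ skill_name ++ "` with no additional details."
  else pvAssemble skill_name st.2.2.1 st.2.2.2

-- ===== PRECONDITION & SPEC =====
def Spec_compress_skill_content_py (content : String) (skill_name : String) (out : String) : Prop := out = compress_skill_content_py_alt content skill_name
instance (content : String) (skill_name : String) (out : String) : Decidable (Spec_compress_skill_content_py content skill_name out) := by unfold Spec_compress_skill_content_py; infer_instance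

-- ===== CLAIM (what is proved, stated in full; the proofs are below) =====
def Claim_equal_compress_skill_content_py : Prop := ∀ (content : String) (skill_name : String), Dom_compress_skill_content_py content skill_name → Spec_compress_skill_content_py content skill_name (compress_skill_content_py content skill_name)

-- ===== LEMMAS AND PROOFS =====

theorem pvNE_cons_empty (r : String) (rest : List String) (h : PySem.Str.strip r = "") :
    pvNE (r :: rest) = pvNE rest := by simp [pvNE, h]

theorem pvNE_cons_ne (r : String) (rest : List String) (h : ¬ PySem.Str.strip r = "") :
    pvNE (r :: rest) = PySem.Str.strip r :: pvNE rest := by simp [pvNE, h]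

theorem pvAltLoop_seen (rs : List String) (s df : Bool) (d : String) (b : List String) :
    (pvAltLoop rs s df d b).1 = (s || !(pvNE rs).isEmpty) := by
  induction rs generalizing s df d b with
  | nil => simp [pvAltLoop, pvNE]
  | cons r rest ih =>
    simp only [pvAltLoop]
    by_cases h : PySem.Str.strip r = ""
    · have hb : (PySem.Str.strip r == "") = true := by simpa using h
      rw [if_pos hb, ih, pvNE_cons_empty r rest h]
    · have hb : (PySem.Str.strip r == "") = false := by simpa using h
      simp only [hb, Bool.false_eq_true, if_false, ih, pvNE_cons_ne r rest h,
        List.isEmpty_cons, Bool.not_false, Bool.true_or, Bool.or_true]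

theorem pvAltLoop_desc_found (rs : List String) (s : Bool) (d : String) (b : List String) :
    (pvAltLoop rs s true d b).2.2.1 = d := by
  induction rs generalizing s b with
  | nil => simp [pvAltLoop]
  | cons r rest ih =>
    simp only [pvAltLoop]
    by_cases h : (PySem.Str.strip r == "") = true
    · rw [if_pos h]; exact ih s b
    · simp only [h, Bool.false_eq_true, if_false, Bool.not_true, Bool.false_and,
        if_neg (by simp : ¬ (false = true))]
      exact ih true _

theorem pvAltLoop_desc (rs : List String) (s : Bool) (b : List String) :
    (pvAltLoop rs s false "" b).2.2.1 = pvDescLoop (pvNE rs) := by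
  induction rs generalizing s b with
  | nil => simp [pvAltLoop, pvDescLoop, pvNE]
  | cons r rest ih =>
    simp only [pvAltLoop]
    by_cases h : PySem.Str.strip r = ""
    · have hb : (PySem.Str.strip r == "") = true := by simpa using h
      rw [if_pos hb, ih, pvNE_cons_empty r rest h]
    · have hb : (PySem.Str.strip r == "") = false := by simpa using h
      rw [pvNE_cons_ne r rest h]
      by_cases hd : PySem.Str.startswith (PySem.Str.lower (PySem.Str.strip r)) "description:" = true
      · simp only [hb, Bool.false_eq_true, if_false, Bool.not_false, Bool.true_and, hd, if_true,
          pvAltLoop_desc_found, pvDescLoop, hd, if_pos hd]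
      · have hd' : PySem.Str.startswith (PySem.Str.lower (PySem.Str.strip r)) "description:" = false := by
          simpa using hd
        simp only [hb, Bool.false_eq_true, if_false, Bool.not_false, Bool.true_and, hd',
          if_neg (by simp : ¬ (false = true)), ih, pvDescLoop]

theorem pvAltLoop_body_full (rs : List String) (s df : Bool) (d : String) (b : List String)
    (hb : ¬ b.length < 4) : (pvAltLoop rs s df d b).2.2.2 = b := by
  induction rs generalizing s df d with
  | nil => simp [pvAltLoop]
  | cons r rest ih =>
    simp only [pvAltLoop]
    by_cases h : (PySem.Str.strip r == "") = true
    · rw [if_pos h]; exact ih s df d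
    · have hlt : decide (b.length < 4) = false := by simpa using hb
      simp only [h, Bool.false_eq_true, if_false, hlt, Bool.false_and,
        if_neg (by simp : ¬ (false = true))]
      exact ih true _ _

theorem pvAltLoop_body (rs : List String) (s df : Bool) (d : String) (b : List String)
    (hb : b.length < 4) : (pvAltLoop rs s df d b).2.2.2 = pvBodyLoop (pvNE rs) b := by
  induction rs generalizing s df d b with
  | nil => simp [pvAltLoop, pvBodyLoop, pvNE]
  | cons r rest ih =>
    simp only [pvAltLoop]
    by_cases h : PySem.Str.strip r = ""
    · have hbeq : (PySem.Str.strip r == "") = true := by simpa using h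
      rw [if_pos hbeq, ih _ _ _ _ hb, pvNE_cons_empty r rest h]
    · have hbeq : (PySem.Str.strip r == "") = false := by simpa using h
      have hlt : decide (b.length < 4) = true := by simpa using hb
      rw [pvNE_cons_ne r rest h]
      by_cases c1 : (PySem.Str.startswith (PySem.Str.strip r) "#" ||
                     PySem.Str.startswith (PySem.Str.strip r) "---") = true
      · simp only [hbeq, Bool.false_eq_true, if_false, hlt, Bool.true_and, c1, Bool.not_true,
          Bool.false_and, Bool.and_false, if_neg (by simp : ¬ (false = true)),
          pvBodyLoop, if_pos c1]
        exact ih _ _ _ _ hb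
      · have c1' : (PySem.Str.startswith (PySem.Str.strip r) "#" ||
                    PySem.Str.startswith (PySem.Str.strip r) "---") = false := by simpa using c1
        by_cases c2 : (PySem.Str.startswith (PySem.Str.lower (PySem.Str.strip r)) "name:" ||
                       PySem.Str.startswith (PySem.Str.lower (PySem.Str.strip r)) "description:" ||
                       PySem.Str.startswith (PySem.Str.lower (PySem.Str.strip r)) "license:") = true
        · simp only [hbeq, Bool.false_eq_true, if_false, hlt, Bool.true_and, c1', Bool.not_false,
            c2, Bool.not_true, Bool.and_false, if_neg (by simp : ¬ (false = true)),
            pvBodyLoop, if_neg c1, if_pos c2]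
          exact ih _ _ _ _ hb
        · have c2' : (PySem.Str.startswith (PySem.Str.lower (PySem.Str.strip r)) "name:" ||
                      PySem.Str.startswith (PySem.Str.lower (PySem.Str.strip r)) "description:" ||
                      PySem.Str.startswith (PySem.Str.lower (PySem.Str.strip r)) "license:") = false := by
            simpa using c2
          simp only [hbeq, Bool.false_eq_true, if_false, hlt, Bool.true_and, c1', Bool.not_false,
            c2', Bool.and_true, if_pos rfl, if_true, pvBodyLoop,
            if_neg c1, if_neg c2]
          by_cases h4 : (b ++ [PySem.Str.strip r]).length = 4
          · rw [if_pos h4, pvAltLoop_body_full _ _ _ _ _ (by omega)]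
          · rw [if_neg h4, ih _ _ _ _ (by simp at h4 ⊢; omega)]

-- ===== VERDICT (by name: the statement is the Claim_ definition above) =====
theorem compress_skill_content_py_spec : Claim_equal_compress_skill_content_py := by
  intro content skill_name _
  unfold Spec_compress_skill_content_py compress_skill_content_py compress_skill_content_py_alt
  have hseen := pvAltLoop_seen (PySem.Str.splitlines content) false false "" []
  have hdesc := pvAltLoop_desc (PySem.Str.splitlines content) false []
  have hbody := pvAltLoop_body (PySem.Str.splitlines content) false false "" [] (by simp)
  by_cases hne : pvNE (PySem.Str.splitlines content) = []
  · rw [hne] at hseen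
    simp only [List.isEmpty_nil, Bool.not_true, Bool.or_false] at hseen
    simp [hne, hseen]
  · have hE : (pvNE (PySem.Str.splitlines content)).isEmpty = false := by
      simpa [List.isEmpty_iff] using hne
    rw [hE] at hseen
    simp only [Bool.not_false, Bool.or_true] at hseen
    simp [hne, hseen, hdesc, hbody]
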